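-- pv_equiv track=rewrite | github.com/PetrPrazak/AdventOfCode | 2025/06/aoc2025_06.py | part2
-- ===== SOURCE A (Python) =====
-- from itertools import zip_longest
-- from math import prod
--
-- def part2(data):
--     op_line, data = data[-1], data[:-1]
--     # indices of separator columns
--     cols = [i-1 for i, c in enumerate(op_line) if c != ' ' and i != 0]
--     cols.append(max(len(l) for l in data))
--     # list of functions to apply
--     ops = [prod if c == '*' else sum for c in op_line if c != ' ']
--     idx, acc = 0, 0
--     for col, op in zip(cols, ops):
--         # extract the numbers for particular column
--         parts = [line[idx:col] for line in data]
--         idx = col + 1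
--         # rotate, build the number and call operation on the list
--         acc += op(int(''.join(c for c in num if c != ' '))
--                   for num in zip_longest(*parts, fillvalue=' '))
--     return acc
-- ===== SOURCE B (Python) =====
-- def part2(data):
--     op_line, grid = data[-1], data[:-1]
--     width = max(len(l) for l in grid)
--
--     def column_number(j):
--         # read column j straight off the grid: no transpose, no padding
--         return int(''.join(line[j] for line in grid
--                            if j < len(line) and line[j] != ' '))
--
--     bounds = [i - 1 for i, c in enumerate(op_line) if c != ' ' and i != 0]
--     bounds.append(width)
--     ops = [c for c in op_line if c != ' ']
--
--     def go(k, idx):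
--         if k >= len(bounds) or k >= len(ops):
--             return 0
--         col = bounds[k]
--         mul = ops[k] == '*'
--         run = 1 if mul else 0
--         for j in range(idx, min(col, width)):
--             n = column_number(j)
--             run = run * n if mul else run + n
--         return run + go(k + 1, col + 1)
--
--     return go(0, 0)
-- ===== Notes on version B (the rewrite author's own statement) =====
-- stated objective: alternative
-- what changed: B never transposes: it reads each vertical number straight off the grid with a per-column index scan, accumulates each block with an incremental running sum/product (identity-seeded fold instead of sum/prod over a zip_longest-built list), and recurses over the (boundary, op) blocks instead of folding a zipped list.
import Mathlib
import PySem

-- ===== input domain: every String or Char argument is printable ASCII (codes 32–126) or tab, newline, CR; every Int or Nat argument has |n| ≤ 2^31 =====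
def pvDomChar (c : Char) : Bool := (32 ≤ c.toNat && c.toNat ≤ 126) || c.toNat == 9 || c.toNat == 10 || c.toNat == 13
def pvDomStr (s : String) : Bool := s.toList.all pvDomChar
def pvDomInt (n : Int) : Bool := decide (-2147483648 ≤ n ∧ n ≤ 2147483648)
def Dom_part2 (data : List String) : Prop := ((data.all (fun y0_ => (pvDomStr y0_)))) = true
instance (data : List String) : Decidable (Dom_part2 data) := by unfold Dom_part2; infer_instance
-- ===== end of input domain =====

-- B drops A's zip_longest transpose entirely: it reads each vertical number directly off the
-- grid by column index, accumulates each block with an incremental identity-seeded running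
-- sum/product instead of sum/prod over a built list, and recurses over the (boundary, op)
-- blocks instead of folding a zipped list (objective: alternative).

-- ===== PORT A =====
-- helpers shared verbatim by both Pythons (boundary/op extraction from op_line, max width)
def pvMaxW (body : List (List Char)) : Nat := body.foldl (fun m l => max m l.length) 0
-- cols = [i-1 for i, c in enumerate(op_line) if c != ' ' and i != 0] + [w]; indices are ≥ 1 so Nat i-1 is exact
def pvBounds (opLine : List Char) (w : Nat) : List Nat :=
  (opLine.zipIdx.filterMap (fun ci => if ci.1 ≠ ' ' ∧ ci.2 ≠ 0 then some (ci.2 - 1) else none)) ++ [w]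
def pvOps (opLine : List Char) : List Char := opLine.filter (fun c => c ≠ ' ')
-- int(''.join(c for c in row if c != ' ')); Pre_part2 excludes the inputs where int() raises (ofStr? = none)
def pvParse (row : List Char) : Int :=
  (PySem.Int.ofStr? (String.ofList (row.filter (fun c => c ≠ ' ')))).getD 0
-- math.prod / sum of the list of numbers (A only)
def pvApply (op : Char) (nums : List Int) : Int :=
  if op = '*' then nums.foldl (· * ·) 1 else nums.foldl (· + ·) 0
-- A's loop body: slice every line, zip_longest-transpose the block, parse, apply op
def pvStep (body : List (List Char)) : Nat × Int → Nat × Char → Nat × Int :=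
  fun st bc =>
    let parts := body.map (fun l => (l.drop st.1).take (bc.1 - st.1))
    let h := pvMaxW parts
    let nums := (List.range h).map (fun j => pvParse (parts.map (fun p => p.getD j ' ')))
    (bc.1 + 1, st.2 + pvApply bc.2 nums)

def part2 (data : List String) : Int :=
  let opLine := (data.getLast?.getD "").toList        -- data[-1]; Pre_part2 excludes data = []
  let body := data.dropLast.map String.toList         -- data[:-1]
  let w := pvMaxW body                                -- max(len(l) for l in data); Pre_part2 excludes body = []
  (((pvBounds opLine w).zip (pvOps opLine)).foldl (pvStep body) (0, 0)).2

-- ===== PORT B =====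
-- line[j] if j < len(line) and line[j] != ' ': keep the in-range non-space character of column j
def pvColPick (j : Nat) (l : List Char) : Option Char :=
  match l[j]? with
  | some c => if c ≠ ' ' then some c else none
  | none => none
-- column_number(j): int of column j read straight off the grid; getD 0 unreachable inside Pre_part2
def pvColNum (grid : List (List Char)) (j : Nat) : Int :=
  (PySem.Int.ofStr? (String.ofList (grid.filterMap (pvColPick j)))).getD 0
-- go(k, idx): recursion over the blocks with an incremental running sum/product
def pvGo (grid : List (List Char)) (width : Nat) (bounds : List Nat) (ops : List Char)
    (k idx : Nat) : Int :=
  if h : k < bounds.length ∧ k < ops.length then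
    let col := bounds[k]
    -- for j in range(idx, min(col, width)): run = run*n or run+n; Nat count matches Python's empty range
    let run := (List.range' idx (min col width - idx)).foldl
      (fun r j => if ops[k] = '*' then r * pvColNum grid j else r + pvColNum grid j)
      (if ops[k] = '*' then 1 else 0)
    run + pvGo grid width bounds ops (k + 1) (col + 1)
  else 0
termination_by bounds.length - k
decreasing_by omega

def part2_alt (data : List String) : Int :=
  let opLine := (data.getLast?.getD "").toList
  let grid := data.dropLast.map String.toList
  let width := pvMaxW grid
  pvGo grid width (pvBounds opLine width) (pvOps opLine) 0 0

-- ===== PRECONDITION & SPEC =====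
-- Pre_part2 = exactly the inputs where Python A returns: at least two lines (else data[-1]/max() raises)
-- and every vertical number in every op block parses as a Python int (else int() raises ValueError).
def Pre_part2 (data : List String) : Prop :=
  2 ≤ data.length ∧
  (let opLine := (data.getLast?.getD "").toList
   let body := data.dropLast.map String.toList
   let w := pvMaxW body
   let bounds := pvBounds opLine w
   ∀ p ∈ ((0 :: bounds.map (· + 1)).zip bounds).take (pvOps opLine).length,
     ∀ j ∈ List.range w, p.1 ≤ j → j < p.2 →
       PySem.Int.ofStr? (String.ofList ((body.map (fun l => l.getD j ' ')).filter (fun c => c ≠ ' '))) ≠ none)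
instance (data : List String) : Decidable (Pre_part2 data) := by unfold Pre_part2; infer_instance
def pvWitness_part2 : List String := ["", ""]
def Spec_part2 (data : List String) (out : Int) : Prop := out = part2_alt data
instance (data : List String) (out : Int) : Decidable (Spec_part2 data out) := by unfold Spec_part2; infer_instance

-- ===== CLAIM (what is proved, stated in full; the proofs are below) =====
def Claim_equal_part2 : Prop := ∀ (data : List String), Dom_part2 data → Pre_part2 data → Spec_part2 data (part2 data)

-- ===== LEMMAS AND PROOFS =====

theorem pv_foldl_max_shift (f : List Char → Nat) (body : List (List Char)) :
    ∀ a : Nat, body.foldl (fun m l => max m (f l)) a = max a (body.foldl (fun m l => max m (f l)) 0) := by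
  induction body with
  | nil => intro a; simp [List.foldl]
  | cons l t ih => intro a; simp only [List.foldl]; rw [ih, ih (max 0 (f l))]; omega

theorem pv_maxW_cons (l : List Char) (t : List (List Char)) :
    pvMaxW (l :: t) = max l.length (pvMaxW t) := by
  unfold pvMaxW
  simp only [List.foldl]
  rw [pv_foldl_max_shift (fun l => l.length) t]
  omega

theorem pv_maxW_slice (body : List (List Char)) (idx cap : Nat) :
    pvMaxW (body.map (fun l => (l.drop idx).take cap)) = min cap (pvMaxW body - idx) := by
  induction body with
  | nil => simp [pvMaxW]
  | cons l t ih =>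
    rw [List.map_cons, pv_maxW_cons, pv_maxW_cons, ih]
    simp only [List.length_take, List.length_drop]
    omega

theorem pv_slice_getD (l : List Char) (idx cap j : Nat) (hj : j < cap) :
    ((l.drop idx).take cap).getD j ' ' = l.getD (idx + j) ' ' := by
  simp [List.getD_eq_getElem?_getD, List.getElem?_drop, hj]

-- the padded transposed row of A, spaces filtered, is exactly B's direct column read
theorem pv_col_filter (grid : List (List Char)) (m : Nat) :
    (grid.map (fun l => l.getD m ' ')).filter (fun c => c ≠ ' ') = grid.filterMap (pvColPick m) := by
  induction grid with
  | nil => rfl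
  | cons l t ih =>
    rw [List.map_cons, List.filter_cons, List.filterMap_cons]
    cases h : l[m]? with
    | none =>
      have h1 : l.getD m ' ' = ' ' := by simp [List.getD_eq_getElem?_getD, h]
      have h2 : pvColPick m l = none := by simp [pvColPick, h]
      rw [h1, h2, if_neg (by simp), ih]
    | some c =>
      have h1 : l.getD m ' ' = c := by simp [List.getD_eq_getElem?_getD, h]
      rw [h1]
      by_cases hc : c = ' '
      · have h2 : pvColPick m l = none := by simp [pvColPick, h, hc]
        rw [h2, hc, if_neg (by simp), ih]
      · have h2 : pvColPick m l = some c := by simp [pvColPick, h, hc]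
        rw [h2, if_pos (by simp [hc]), ih]

theorem pv_parse_col (grid : List (List Char)) (m : Nat) :
    pvParse (grid.map (fun l => l.getD m ' ')) = pvColNum grid m := by
  unfold pvParse pvColNum
  rw [pv_col_filter]

-- A's per-block value (slice, transpose, parse, sum/prod) = B's incremental run over the column range
theorem pv_block (grid : List (List Char)) (idx col : Nat) (c : Char) :
    pvApply c ((List.range (pvMaxW (grid.map (fun l => (l.drop idx).take (col - idx))))).map
        (fun j => pvParse ((grid.map (fun l => (l.drop idx).take (col - idx))).map (fun p => p.getD j ' '))))
      = (List.range' idx (min col (pvMaxW grid) - idx)).foldl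
          (fun r j => if c = '*' then r * pvColNum grid j else r + pvColNum grid j)
          (if c = '*' then 1 else 0) := by
  have hcount : min (col - idx) (pvMaxW grid - idx) = min col (pvMaxW grid) - idx := by omega
  have hnums : (List.range (pvMaxW (grid.map (fun l => (l.drop idx).take (col - idx))))).map
        (fun j => pvParse ((grid.map (fun l => (l.drop idx).take (col - idx))).map (fun p => p.getD j ' ')))
      = (List.range' idx (min col (pvMaxW grid) - idx)).map (pvColNum grid) := by
    rw [pv_maxW_slice, hcount, List.range'_eq_map_range, List.map_map]
    apply List.map_congr_left
    intro j hj
    rw [List.mem_range] at hj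
    have hcap : j < col - idx := by omega
    have : (grid.map (fun l => (l.drop idx).take (col - idx))).map (fun p => p.getD j ' ')
        = grid.map (fun l => l.getD (idx + j) ' ') := by
      rw [List.map_map]
      apply List.map_congr_left
      intro l _
      exact pv_slice_getD l idx (col - idx) j hcap
    rw [this, pv_parse_col]
    rfl
  rw [hnums]
  by_cases hc : c = '*' <;> simp [pvApply, hc, List.foldl_map]

theorem pvGo_eq_pos (grid : List (List Char)) (w : Nat) (bounds : List Nat) (ops : List Char)
    (k idx : Nat) (h : k < bounds.length ∧ k < ops.length) :
    pvGo grid w bounds ops k idx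
      = (List.range' idx (min bounds[k] w - idx)).foldl
          (fun r j => if ops[k] = '*' then r * pvColNum grid j else r + pvColNum grid j)
          (if ops[k] = '*' then 1 else 0)
        + pvGo grid w bounds ops (k + 1) (bounds[k] + 1) := by
  rw [pvGo, dif_pos h]

-- A's foldl over the zipped (bounds, ops) list, from block k on, equals B's recursion go(k, idx)
theorem pv_fold_go (grid : List (List Char)) (bounds : List Nat) (ops : List Char) :
    ∀ (n k idx : Nat) (acc : Int), bounds.length - k ≤ n →
      (((bounds.drop k).zip (ops.drop k)).foldl (pvStep grid) (idx, acc)).2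
        = acc + pvGo grid (pvMaxW grid) bounds ops k idx := by
  intro n
  induction n with
  | zero =>
    intro k idx acc hk
    have : bounds.length ≤ k := by omega
    rw [List.drop_eq_nil_of_le this]
    rw [pvGo, dif_neg (by omega)]
    simp
  | succ n ih =>
    intro k idx acc hk
    by_cases h : k < bounds.length ∧ k < ops.length
    · rw [List.drop_eq_getElem_cons h.1, List.drop_eq_getElem_cons h.2, List.zip_cons_cons,
        List.foldl_cons]
      have hstep : pvStep grid (idx, acc) (bounds[k], ops[k])
          = (bounds[k] + 1, acc + pvApply ops[k]
              ((List.range (pvMaxW (grid.map (fun l => (l.drop idx).take (bounds[k] - idx))))).map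
                (fun j => pvParse ((grid.map (fun l => (l.drop idx).take (bounds[k] - idx))).map
                  (fun p => p.getD j ' '))))) := rfl
      rw [hstep, ih (k + 1) (bounds[k] + 1) _ (by omega),
        pvGo_eq_pos grid (pvMaxW grid) bounds ops k idx h,
        pv_block grid idx bounds[k] ops[k]]
      ring
    · have hz : (bounds.drop k).zip (ops.drop k) = [] := by
        rcases Nat.lt_or_ge k bounds.length with hb | hb
        · have : ops.length ≤ k := by omega
          rw [List.drop_eq_nil_of_le this, List.zip_nil_right]
        · rw [List.drop_eq_nil_of_le hb, List.zip_nil_left]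
      rw [hz, pvGo, dif_neg h]
      simp

-- ===== VERDICT (by name: the statement is the Claim_ definition above) =====
theorem part2_spec : Claim_equal_part2 := by
  intro data _ _
  unfold Spec_part2
  simp only [part2, part2_alt]
  have := pv_fold_go ((data.dropLast.map String.toList))
    (pvBounds (data.getLast?.getD "").toList (pvMaxW (data.dropLast.map String.toList)))
    (pvOps (data.getLast?.getD "").toList)
    (pvBounds (data.getLast?.getD "").toList (pvMaxW (data.dropLast.map String.toList))).length
    0 0 0 (by omega)
  simpa using this
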